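-- pv_equiv track=rewrite | github.com/mungakim/duck-sun-modesto | duck_sun/scheduler.py | _count_unique_days_noaa
-- ===== SOURCE A (Python) =====
-- from typing import Any, Dict, List, Optional
--
-- def _count_unique_days_noaa(data: List[Dict]) -> int:
--     """Count unique days in NOAA hourly data."""
--     if not data or not isinstance(data, list):
--         return 0
--     dates = set()
--     for record in data:
--         if isinstance(record, dict):
--             # NOAA uses 'valid_time' or 'time' key
--             time_str = record.get('valid_time', record.get('time', ''))
--             if time_str:
--                 dates.add(time_str[:10])  # Extract YYYY-MM-DD
--     return len(dates)
-- ===== SOURCE B (Python) =====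
-- from typing import Any, Dict, List, Optional
--
-- def _count_unique_days_noaa(data: List[Dict]) -> int:
--     """Count unique days in NOAA hourly data (sort-and-scan variant)."""
--     if not data or not isinstance(data, list):
--         return 0
--     prefixes = []
--     for record in data:
--         if isinstance(record, dict):
--             time_str = record.get('valid_time', record.get('time', ''))
--             if time_str:
--                 prefixes.append(time_str[:10])
--     prefixes.sort()
--     count = 0
--     prev = None
--     for p in prefixes:
--         if p != prev:
--             count += 1
--             prev = p
--     return count
-- ===== Notes on version B (the rewrite author's own statement) =====
-- stated objective: alternative
-- what changed: B collects the extracted day prefixes into a plain list, sorts it, and counts distinct values in one adjacent-difference scan, instead of A's incremental set accumulation with len(set).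
import Mathlib
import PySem

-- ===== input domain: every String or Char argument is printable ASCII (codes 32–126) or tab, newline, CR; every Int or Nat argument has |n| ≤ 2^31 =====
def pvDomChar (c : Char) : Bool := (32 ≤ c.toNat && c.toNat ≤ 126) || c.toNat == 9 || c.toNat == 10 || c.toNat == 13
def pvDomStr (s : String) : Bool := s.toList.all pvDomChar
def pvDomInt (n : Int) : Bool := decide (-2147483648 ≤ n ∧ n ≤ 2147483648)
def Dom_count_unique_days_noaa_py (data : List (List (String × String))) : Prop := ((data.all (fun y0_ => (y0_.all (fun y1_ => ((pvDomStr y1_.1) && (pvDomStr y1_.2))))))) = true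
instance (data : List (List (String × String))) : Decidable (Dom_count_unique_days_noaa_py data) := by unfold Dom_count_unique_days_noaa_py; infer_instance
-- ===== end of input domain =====

-- B replaces A's set accumulation by collecting the day prefixes in a list, sorting it and
-- counting distinct adjacent values in one scan (objective: alternative; same result, no speed claim).

-- ===== PORT A =====
-- isinstance(data, list) and isinstance(record, dict) are always true under the type convention.
def count_unique_days_noaa_py (data : List (List (String × String))) : Int :=
  if data = [] then 0
  else
    let dates := data.foldl (fun (dates : PySem.Set String) record =>
      let time_str := PySem.Dict.getD (PySem.Dict.mk record) "valid_time"
                        (PySem.Dict.getD (PySem.Dict.mk record) "time" "")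
      if time_str = "" then dates
      else PySem.Set.add dates (PySem.Str.slice time_str none (some 10))) PySem.Set.empty
    PySem.Set.len dates

-- ===== PORT B =====
def count_unique_days_noaa_py_alt (data : List (List (String × String))) : Int :=
  if data = [] then 0
  else
    let prefixes := data.foldl (fun (acc : List String) record =>
      let time_str := PySem.Dict.getD (PySem.Dict.mk record) "valid_time"
                        (PySem.Dict.getD (PySem.Dict.mk record) "time" "")
      if time_str = "" then acc
      else acc ++ [PySem.Str.slice time_str none (some 10)]) []
    let sorted := PySem.List.sorted prefixes (fun x => x) false
    (sorted.foldl (fun (st : Int × Option String) p =>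
      if some p ≠ st.2 then (st.1 + 1, some p) else st) (0, none)).1

-- ===== PRECONDITION & SPEC =====
def Spec_count_unique_days_noaa_py (data : List (List (String × String))) (out : Int) : Prop := out = count_unique_days_noaa_py_alt data
instance (data : List (List (String × String))) (out : Int) : Decidable (Spec_count_unique_days_noaa_py data out) := by unfold Spec_count_unique_days_noaa_py; infer_instance

-- ===== CLAIM (what is proved, stated in full; the proofs are below) =====
def Claim_equal_count_unique_days_noaa_py : Prop := ∀ (data : List (List (String × String))), Dom_count_unique_days_noaa_py data → Spec_count_unique_days_noaa_py data (count_unique_days_noaa_py data)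

-- ===== LEMMAS AND PROOFS =====

-- the per-record extraction both programs perform
def pvExtract (record : List (String × String)) : Option String :=
  let time_str := PySem.Dict.getD (PySem.Dict.mk record) "valid_time"
                    (PySem.Dict.getD (PySem.Dict.mk record) "time" "")
  if time_str = "" then none
  else some (PySem.Str.slice time_str none (some 10))

lemma foldA_eq_update (data : List (List (String × String))) :
    ∀ (s : PySem.Set String),
      data.foldl (fun (dates : PySem.Set String) record =>
        let time_str := PySem.Dict.getD (PySem.Dict.mk record) "valid_time"
                          (PySem.Dict.getD (PySem.Dict.mk record) "time" "")
        if time_str = "" then dates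
        else PySem.Set.add dates (PySem.Str.slice time_str none (some 10))) s
      = PySem.Set.update s (data.filterMap pvExtract) := by
  induction data with
  | nil => intro s; simp [PySem.Set.update]
  | cons r rest ih =>
      intro s
      simp only [List.foldl_cons, List.filterMap_cons]
      by_cases h : PySem.Dict.getD (PySem.Dict.mk r) "valid_time"
          (PySem.Dict.getD (PySem.Dict.mk r) "time" "") = ""
      · have hE : pvExtract r = none := by simp [pvExtract, h]
        rw [hE]; simp [h, ih]
      · have hE : pvExtract r = some (PySem.Str.slice (PySem.Dict.getD (PySem.Dict.mk r)
            "valid_time" (PySem.Dict.getD (PySem.Dict.mk r) "time" "")) none (some 10)) := by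
          simp [pvExtract, h]
        rw [hE]; simp [h, ih, PySem.Set.update_cons]

lemma foldB_eq_append (data : List (List (String × String))) :
    ∀ (acc : List String),
      data.foldl (fun (acc : List String) record =>
        let time_str := PySem.Dict.getD (PySem.Dict.mk record) "valid_time"
                          (PySem.Dict.getD (PySem.Dict.mk record) "time" "")
        if time_str = "" then acc
        else acc ++ [PySem.Str.slice time_str none (some 10)]) acc
      = acc ++ data.filterMap pvExtract := by
  induction data with
  | nil => intro acc; simp
  | cons r rest ih =>
      intro acc
      simp only [List.foldl_cons, List.filterMap_cons]
      by_cases h : PySem.Dict.getD (PySem.Dict.mk r) "valid_time"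
          (PySem.Dict.getD (PySem.Dict.mk r) "time" "") = ""
      · have hE : pvExtract r = none := by simp [pvExtract, h]
        rw [hE]; simp [h, ih]
      · have hE : pvExtract r = some (PySem.Str.slice (PySem.Dict.getD (PySem.Dict.mk r)
            "valid_time" (PySem.Dict.getD (PySem.Dict.mk r) "time" "")) none (some 10)) := by
          simp [pvExtract, h]
        rw [hE]; simp [h, ih]

lemma card_insert_eq_erase_add_one (a : String) (s : Finset String) :
    (insert a s).card = (s.erase a).card + 1 := by
  by_cases h : a ∈ s
  · rw [Finset.insert_eq_self.mpr h, ← Finset.card_erase_add_one h]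
  · rw [Finset.card_insert_of_notMem h, Finset.erase_eq_of_notMem h]

lemma scan_sorted_aux (xs : List String) :
    ∀ (c : Int) (p : String), xs.Pairwise (· ≤ ·) → (∀ y ∈ xs, p ≤ y) →
      (xs.foldl (fun (st : Int × Option String) q =>
        if some q ≠ st.2 then (st.1 + 1, some q) else st) (c, some p)).1
      = c + ((xs.toFinset).erase p).card := by
  induction xs with
  | nil => intro c p _ _; simp
  | cons a rest ih =>
      intro c p hpair hmin
      have hrest : rest.Pairwise (· ≤ ·) := (List.pairwise_cons.mp hpair).2
      have hale : ∀ y ∈ rest, a ≤ y := (List.pairwise_cons.mp hpair).1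
      have hpa : p ≤ a := hmin a (by simp)
      by_cases h : a = p
      · subst h
        simp only [List.foldl_cons, ne_eq, not_true_eq_false, if_neg,
          not_false_eq_true]
        rw [ih c a hrest hale]
        simp [Finset.erase_insert_eq_erase]
      · have hlt : p < a := lt_of_le_of_ne hpa (fun e => h e.symm)
        have hpn : p ∉ (a :: rest).toFinset := by
          simp only [List.toFinset_cons, Finset.mem_insert, List.mem_toFinset]
          rintro (rfl | hm)
          · exact h rfl
          · exact absurd (hale p hm) (not_le.mpr hlt)
        simp only [List.foldl_cons, ne_eq, Option.some.injEq]
        rw [if_pos (by simpa using fun e => h e)]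
        rw [ih (c + 1) a hrest hale]
        rw [Finset.erase_eq_of_notMem hpn]
        rw [List.toFinset_cons, card_insert_eq_erase_add_one]
        push_cast
        ring

lemma scan_sorted (xs : List String) (hpair : xs.Pairwise (· ≤ ·)) :
    (xs.foldl (fun (st : Int × Option String) q =>
      if some q ≠ st.2 then (st.1 + 1, some q) else st) (0, none)).1
    = xs.toFinset.card := by
  cases xs with
  | nil => simp
  | cons a rest =>
      simp only [List.foldl_cons, ne_eq, reduceCtorEq, not_false_eq_true, if_pos, zero_add]
      rw [scan_sorted_aux rest 1 a (List.pairwise_cons.mp hpair).2 (List.pairwise_cons.mp hpair).1]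
      rw [List.toFinset_cons, card_insert_eq_erase_add_one]
      push_cast
      ring

lemma ofList_length_eq_card (l : List String) :
    (PySem.Set.ofList l).length = l.toFinset.card := by
  have hnd : (PySem.Set.ofList l).Nodup := PySem.Set.nodup_ofList l
  have hfs : (PySem.Set.ofList l).toFinset = l.toFinset := by
    ext x
    simp [List.mem_toFinset, PySem.Set.mem_ofList]
  rw [← List.toFinset_card_of_nodup hnd, hfs]

-- ===== VERDICT (by name: the statement is the Claim_ definition above) =====
theorem count_unique_days_noaa_py_spec : Claim_equal_count_unique_days_noaa_py := by
  intro data _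
  unfold Spec_count_unique_days_noaa_py count_unique_days_noaa_py count_unique_days_noaa_py_alt
  by_cases hnil : data = []
  · simp [hnil]
  · simp only [hnil, reduceIte]
    rw [foldA_eq_update data PySem.Set.empty, foldB_eq_append data []]
    set l := data.filterMap pvExtract with hl
    have hA : PySem.Set.update PySem.Set.empty l = PySem.Set.ofList l :=
      PySem.Set.update_nil_left l
    rw [hA, List.nil_append]
    have hs : (PySem.List.sorted l (fun x => x) false).Pairwise (· ≤ ·) := by
      simpa using PySem.List.sorted_pairwise (xs := l) (key := fun x => x)
    rw [scan_sorted _ hs]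
    have hperm : (PySem.List.sorted l (fun x => x) false).Perm l :=
      PySem.List.sorted_perm l (fun x => x) false
    rw [List.toFinset_eq_of_perm _ _ hperm]
    simp [PySem.Set.len, ofList_length_eq_card l]
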